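-- pv_equiv track=rewrite | github.com/ai2cm/fv3net | external/loaders/loaders/batches/_derived_vars.py | nonderived_variable_names
-- ===== SOURCE A (Python) =====
-- from typing import Tuple, Sequence, Mapping
--
-- def nonderived_variable_names(
--         variable_names,
--         cos_z_var: str = "cos_zenith_angle",
--         latlon_wind_tendency_vars: Tuple[str] = None,
--         xy_wind_tendency_vars: Tuple[str] = None):
--     latlon_wind_tendency_vars = latlon_wind_tendency_vars or ["dQu", "dQv"]
--     xy_wind_tendency_vars = xy_wind_tendency_vars or ["dQx", "dQy"]
--     derived_variables = latlon_wind_tendency_vars + [cos_z_var]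
--     nonderived_variables = [
--         var for var in variable_names if var not in derived_variables]
--     # need to load x/y wind tendencies to derive lat/lon components
--     if any(var in variable_names for var in latlon_wind_tendency_vars):
--         nonderived_variables += xy_wind_tendency_vars
--     return nonderived_variables
-- ===== SOURCE B (Python) =====
-- def nonderived_variable_names(
--         variable_names,
--         cos_z_var="cos_zenith_angle",
--         latlon_wind_tendency_vars=None,
--         xy_wind_tendency_vars=None):
--     latlon = latlon_wind_tendency_vars or ["dQu", "dQv"]
--     xy = xy_wind_tendency_vars or ["dQx", "dQy"]
--     result = []
--     needs_xy = False
--     for var in variable_names: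
--         if var in latlon:
--             needs_xy = True
--         elif var != cos_z_var:
--             result.append(var)
--     if needs_xy:
--         result.extend(xy)
--     return result
-- ===== Notes on version B (the rewrite author's own statement) =====
-- stated objective: simpler
-- what changed: A builds a derived-name list and makes two passes (a filter comprehension plus a separate any(...) scan over the latlon vars); B makes a single pass over variable_names, appending non-derived names and setting a needs_xy flag in the same iteration, then extends with the xy vars once at the end.
import Mathlib
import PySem

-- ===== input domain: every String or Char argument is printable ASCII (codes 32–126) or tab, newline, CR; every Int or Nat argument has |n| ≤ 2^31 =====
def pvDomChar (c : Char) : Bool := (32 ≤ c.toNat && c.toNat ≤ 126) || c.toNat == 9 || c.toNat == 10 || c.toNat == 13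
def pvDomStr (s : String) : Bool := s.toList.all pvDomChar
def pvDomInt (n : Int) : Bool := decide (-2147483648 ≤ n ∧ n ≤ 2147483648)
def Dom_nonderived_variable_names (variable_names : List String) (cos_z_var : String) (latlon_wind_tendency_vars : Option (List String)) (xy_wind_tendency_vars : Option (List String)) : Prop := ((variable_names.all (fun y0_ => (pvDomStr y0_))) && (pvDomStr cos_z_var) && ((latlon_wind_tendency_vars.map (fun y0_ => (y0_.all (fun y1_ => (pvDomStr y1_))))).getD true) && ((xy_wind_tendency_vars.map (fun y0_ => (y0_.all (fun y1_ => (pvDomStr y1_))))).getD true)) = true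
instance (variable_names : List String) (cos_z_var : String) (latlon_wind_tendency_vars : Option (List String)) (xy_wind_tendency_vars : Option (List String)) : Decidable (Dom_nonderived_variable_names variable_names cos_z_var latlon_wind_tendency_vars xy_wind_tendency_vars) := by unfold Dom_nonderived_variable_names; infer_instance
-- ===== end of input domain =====

-- B fuses A's two passes (filter comprehension + separate any(...) scan) into one loop with a needs_xy flag; objective: simpler.

-- `x or default` on an optional list argument: None and [] are falsy, so both fall back to the default.
def pyOrDefault (o : Option (List String)) (d : List String) : List String :=
  match o with
  | none => d
  | some l => if l = [] then d else l

-- ===== PORT A =====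
def nonderived_variable_names (variable_names : List String) (cos_z_var : String) (latlon_wind_tendency_vars : Option (List String)) (xy_wind_tendency_vars : Option (List String)) : List String :=
  let latlon := pyOrDefault latlon_wind_tendency_vars ["dQu", "dQv"]
  let xy := pyOrDefault xy_wind_tendency_vars ["dQx", "dQy"]
  let derived_variables := latlon ++ [cos_z_var]
  let nonderived_variables := variable_names.filter (fun var => !derived_variables.contains var)
  if latlon.any (fun var => variable_names.contains var) then
    nonderived_variables ++ xy
  else
    nonderived_variables

-- ===== PORT B =====
def nonderived_variable_names_alt (variable_names : List String) (cos_z_var : String) (latlon_wind_tendency_vars : Option (List String)) (xy_wind_tendency_vars : Option (List String)) : List String :=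
  let latlon := pyOrDefault latlon_wind_tendency_vars ["dQu", "dQv"]
  let xy := pyOrDefault xy_wind_tendency_vars ["dQx", "dQy"]
  -- single loop: state = (result so far, needs_xy flag)
  let st := variable_names.foldl
    (fun (p : List String × Bool) var =>
      if latlon.contains var then (p.1, true)
      else if var == cos_z_var then p
      else (p.1 ++ [var], p.2))
    ([], false)
  if st.2 then st.1 ++ xy else st.1

-- ===== PRECONDITION & SPEC =====
def Spec_nonderived_variable_names (variable_names : List String) (cos_z_var : String) (latlon_wind_tendency_vars : Option (List String)) (xy_wind_tendency_vars : Option (List String)) (out : List String) : Prop := out = nonderived_variable_names_alt variable_names cos_z_var latlon_wind_tendency_vars xy_wind_tendency_vars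
instance (variable_names : List String) (cos_z_var : String) (latlon_wind_tendency_vars : Option (List String)) (xy_wind_tendency_vars : Option (List String)) (out : List String) : Decidable (Spec_nonderived_variable_names variable_names cos_z_var latlon_wind_tendency_vars xy_wind_tendency_vars out) := by unfold Spec_nonderived_variable_names; infer_instance

-- ===== CLAIM (what is proved, stated in full; the proofs are below) =====
def Claim_equal_nonderived_variable_names : Prop := ∀ (variable_names : List String) (cos_z_var : String) (latlon_wind_tendency_vars : Option (List String)) (xy_wind_tendency_vars : Option (List String)), Dom_nonderived_variable_names variable_names cos_z_var latlon_wind_tendency_vars xy_wind_tendency_vars → Spec_nonderived_variable_names variable_names cos_z_var latlon_wind_tendency_vars xy_wind_tendency_vars (nonderived_variable_names variable_names cos_z_var latlon_wind_tendency_vars xy_wind_tendency_vars)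

-- ===== LEMMAS AND PROOFS =====

-- B's fold computes A's filter together with A's any-flag (with the existential flipped).
theorem pv_fold_spec (latlon : List String) (cosz : String) (xs : List String) (acc : List String) (b : Bool) :
    xs.foldl
      (fun (p : List String × Bool) var =>
        if latlon.contains var then (p.1, true)
        else if var == cosz then p
        else (p.1 ++ [var], p.2))
      (acc, b)
    = (acc ++ xs.filter (fun var => !(latlon ++ [cosz]).contains var),
       b || xs.any (fun var => latlon.contains var)) := by
  induction xs generalizing acc b with
  | nil => simp
  | cons x xs ih =>
    simp only [List.foldl_cons, List.filter_cons, List.any_cons]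
    by_cases hx : latlon.contains x = true
    · have hm : x ∈ latlon := by simpa using hx
      rw [if_pos hx, ih]; simp [hm]
    · have hm : x ∉ latlon := by simpa using hx
      by_cases hc : x = cosz
      · subst hc
        rw [if_neg hx, if_pos (by simp), ih]; simp [hm]
      · rw [if_neg hx, if_neg (by simp [hc]), ih]; simp [hm, hc]

-- the two 'any' scans agree: some latlon var occurs in xs ↔ some xs var occurs in latlon
theorem pv_any_comm (latlon xs : List String) :
    xs.any (fun var => latlon.contains var) = latlon.any (fun var => xs.contains var) := by
  rw [Bool.eq_iff_iff]
  simp only [List.any_eq_true, List.contains_eq_mem, decide_eq_true_eq]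
  exact ⟨fun ⟨a, h1, h2⟩ => ⟨a, h2, h1⟩, fun ⟨a, h1, h2⟩ => ⟨a, h2, h1⟩⟩

-- ===== VERDICT (by name: the statement is the Claim_ definition above) =====
theorem nonderived_variable_names_spec : Claim_equal_nonderived_variable_names := by
  intro variable_names cos_z_var ll xy _
  unfold Spec_nonderived_variable_names nonderived_variable_names nonderived_variable_names_alt
  simp only [pv_fold_spec, pv_any_comm, List.nil_append, Bool.false_or]
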